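-- pv_equiv track=rewrite | github.com/lawrence-ms/Codewars | duplicate_encoder.py | duplicate_encode
-- ===== SOURCE A (Python) =====
-- import collections
--
-- def duplicate_encode(word):
--     dup_dict = collections.defaultdict(int)
--     new_word = ""
--     for letter in word.lower():
--         dup_dict[letter] += 1
--     for letter in word.lower():
--         if dup_dict.get(letter, 0) > 1:
--             new_word += ")"
--         else:
--             new_word += "("
--     return new_word
-- ===== SOURCE B (Python) =====
-- def duplicate_encode(word):
--     lowered = word.lower()
--     return "".join(
--         ")" if c in lowered[:i] or c in lowered[i + 1:] else "("
--         for i, c in enumerate(lowered)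
--     )
-- ===== Notes on version B (the rewrite author's own statement) =====
-- stated objective: alternative
-- what changed: B builds no frequency table and never counts: it lowercases once and, per position i, marks a character as duplicate iff it occurs elsewhere in the string (substring membership in lowered[:i] or lowered[i+1:]), a positional occurs-elsewhere test via slicing instead of A's two-pass defaultdict count-and-threshold.
import Mathlib
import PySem

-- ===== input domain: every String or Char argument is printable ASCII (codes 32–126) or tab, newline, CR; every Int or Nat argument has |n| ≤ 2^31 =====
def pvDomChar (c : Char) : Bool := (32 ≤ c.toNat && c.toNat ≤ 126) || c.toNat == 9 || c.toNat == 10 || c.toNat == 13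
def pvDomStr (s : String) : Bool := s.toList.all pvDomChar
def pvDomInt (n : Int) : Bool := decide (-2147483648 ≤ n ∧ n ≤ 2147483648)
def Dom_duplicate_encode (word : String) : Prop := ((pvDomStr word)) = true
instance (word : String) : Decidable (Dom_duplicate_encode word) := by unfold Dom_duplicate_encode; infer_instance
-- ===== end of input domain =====

-- B builds no frequency table: it lowercases once and, per position i, marks a char as a
-- duplicate iff it occurs elsewhere (in lowered[:i] or lowered[i+1:]) — alternative, not faster.

-- ===== PORT A =====
def duplicate_encode (word : String) : String :=
  let dup_dict : PySem.Dict Char Int :=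
    (PySem.Str.lower word).toList.foldl (fun d letter => d.modify letter 0 (· + 1)) PySem.Dict.empty
  let new_word : List Char :=
    (PySem.Str.lower word).toList.foldl
      (fun acc letter => if dup_dict.getD letter 0 > 1 then acc ++ [')'] else acc ++ ['(']) []
  String.ofList new_word

-- ===== PORT B =====
def duplicate_encode_alt (word : String) : String :=
  let lowered : List Char := (PySem.Str.lower word).toList
  String.ofList (PySem.Chars.join []
    ((PySem.List.enumerate lowered).map (fun p =>
      if PySem.Chars.isIn [p.2] (PySem.Chars.slice lowered none (some p.1)) ||
         PySem.Chars.isIn [p.2] (PySem.Chars.slice lowered (some (p.1 + 1)) none)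
      then [')'] else ['('])))

-- ===== PRECONDITION & SPEC =====
def Spec_duplicate_encode (word : String) (out : String) : Prop := out = duplicate_encode_alt word
instance (word : String) (out : String) : Decidable (Spec_duplicate_encode word out) := by unfold Spec_duplicate_encode; infer_instance

-- ===== CLAIM (what is proved, stated in full; the proofs are below) =====
def Claim_equal_duplicate_encode : Prop := ∀ (word : String), Dom_duplicate_encode word → Spec_duplicate_encode word (duplicate_encode word)

-- ===== LEMMAS AND PROOFS =====

-- A's left fold with a branch appending one char is a map
theorem foldl_paren {α : Type} (l : List α) (P : α → Prop) [DecidablePred P] (acc : List Char) :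
    l.foldl (fun acc c => if P c then acc ++ [')'] else acc ++ ['(']) acc =
      acc ++ l.map (fun c => if P c then ')' else '(') := by
  rw [show (fun (acc : List Char) c => if P c then acc ++ [')'] else acc ++ ['(']) =
      (fun (acc : List Char) c => acc ++ [if P c then ')' else '(']) from by
    funext a c; split <;> rfl]
  exact PySem.List.foldl_append_singleton_eq_map _ l acc

-- B's join of singleton pieces is a map
theorem join_paren {α : Type} (l : List α) (p : α → Bool) :
    PySem.Chars.join [] (l.map (fun c => if p c then [')'] else ['('])) =
      l.map (fun c => if p c then ')' else '(') := by
  induction l with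
  | nil => simp [PySem.Chars.join_nil]
  | cons x xs ih =>
    cases xs with
    | nil => cases h : p x <;> simp [h, PySem.Chars.join_singleton]
    | cons y t =>
      simp only [List.map_cons] at ih ⊢
      rw [PySem.Chars.join_cons_cons, ih]
      cases h : p x <;> simp

theorem getElem_enumerate {α : Type} (l : List α) (s : Int) (j : Nat) (hj : j < l.length)
    (hj' : j < (PySem.List.enumerate l s).length) :
    (PySem.List.enumerate l s)[j] = (s + j, l[j]) := by
  induction l generalizing s j with
  | nil => simp at hj
  | cons x xs ih =>
    simp only [PySem.List.enumerate_cons] at hj' ⊢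
    cases j with
    | zero => simp
    | succ k =>
      have hk : k < xs.length := by simpa using hj
      have hk' : k < (PySem.List.enumerate xs (s + 1)).length := by
        simpa [PySem.List.length_enumerate] using hk
      simp only [List.getElem_cons_succ]
      rw [ih (s + 1) k hk hk']
      refine Prod.ext ?_ rfl
      push_cast; ring

-- singleton substring membership is element membership
theorem isIn_singleton (c : Char) (t : List Char) :
    PySem.Chars.isIn [c] t = true ↔ c ∈ t := by
  rw [PySem.Chars.isIn_iff_infix]
  constructor
  · intro h; exact h.sublist.subset (by simp)
  · intro h
    obtain ⟨pre, suf, hps⟩ := List.append_of_mem h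
    exact ⟨pre, suf, by simp [hps]⟩

theorem count_split (a b : List Char) (c : Char) :
    (c ∈ a ∨ c ∈ b) ↔ 1 < (a ++ c :: b).count c := by
  rw [List.count_append, List.count_cons_self, ← List.count_pos_iff, ← List.count_pos_iff]
  omega

-- occurs-elsewhere at position j ↔ total count exceeds one
theorem elsewhere_iff_count (l : List Char) (j : Nat) (hj : j < l.length) :
    (l[j] ∈ l.take j ∨ l[j] ∈ l.drop (j + 1)) ↔ 1 < l.count l[j] := by
  have hsplit : l = l.take j ++ l[j] :: l.drop (j + 1) := by
    conv_lhs => rw [← List.take_append_drop j l]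
    rw [List.drop_eq_getElem_cons hj]
  generalize hg : l[j] = c
  rw [hg] at hsplit
  conv_rhs => rw [hsplit]
  exact count_split _ _ c

-- ===== VERDICT (by name: the statement is the Claim_ definition above) =====
theorem duplicate_encode_spec : Claim_equal_duplicate_encode := by
  intro word _
  unfold Spec_duplicate_encode duplicate_encode duplicate_encode_alt
  simp only []
  set l := (PySem.Str.lower word).toList with hl
  rw [foldl_paren l (fun letter => ((l.foldl (fun d letter => d.modify letter 0 (· + 1))
        PySem.Dict.empty : PySem.Dict Char Int).getD letter 0) > 1) [],
      join_paren (PySem.List.enumerate l) (fun p =>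
        PySem.Chars.isIn [p.2] (PySem.Chars.slice l none (some p.1)) ||
        PySem.Chars.isIn [p.2] (PySem.Chars.slice l (some (p.1 + 1)) none))]
  simp only [List.nil_append]
  refine congrArg String.ofList ?_
  apply List.ext_getElem
  · simp [PySem.List.length_enumerate]
  · intro j hj hj'
    have hjl : j < l.length := by simpa using hj
    have hje : j < (PySem.List.enumerate l).length := by
      simpa [PySem.List.length_enumerate] using hjl
    simp only [List.getElem_map, getElem_enumerate l 0 j hjl hje]
    rw [PySem.Dict.getD_foldl_modify_add_one]
    have e1 : PySem.Chars.slice l none (some ((0 : Int) + j)) = l.take j := by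
      rw [PySem.Chars.slice_eq_listSlice, zero_add, PySem.List.slice_to_natCast]
    have e2 : PySem.Chars.slice l (some ((0 : Int) + j + 1)) none = l.drop (j + 1) := by
      rw [PySem.Chars.slice_eq_listSlice, zero_add,
        show ((j : Int) + 1) = ((j + 1 : Nat) : Int) by push_cast; ring,
        PySem.List.slice_from_natCast]
    rw [e1, e2]
    have hA : ((PySem.Dict.empty : PySem.Dict Char Int).getD l[j] 0) = 0 := rfl
    rw [hA, zero_add]
    rcases Nat.lt_or_ge 1 (l.count l[j]) with h | h
    · have hm := (elsewhere_iff_count l j hjl).mpr h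
      have hb : (PySem.Chars.isIn [l[j]] (l.take j) ||
          PySem.Chars.isIn [l[j]] (l.drop (j + 1))) = true := by
        rcases hm with hm | hm
        · simp [(isIn_singleton _ _).mpr hm]
        · simp [(isIn_singleton _ _).mpr hm]
      rw [hb, if_pos (by exact_mod_cast h), if_pos rfl]
    · have hb : (PySem.Chars.isIn [l[j]] (l.take j) ||
          PySem.Chars.isIn [l[j]] (l.drop (j + 1))) = false := by
        rw [Bool.or_eq_false_iff]
        constructor <;> (rw [Bool.eq_false_iff]; intro hc)
        · exact absurd ((elsewhere_iff_count l j hjl).mp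
            (Or.inl ((isIn_singleton _ _).mp hc))) (by omega)
        · exact absurd ((elsewhere_iff_count l j hjl).mp
            (Or.inr ((isIn_singleton _ _).mp hc))) (by omega)
      rw [hb, if_neg (by exact_mod_cast Nat.not_lt.mpr h), if_neg (by simp)]
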